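-- pv_equiv track=rewrite | github.com/FranckyB/ComfyUI-Prompt-Manager | py/workflow_families.py | get_compatible_families
-- ===== SOURCE A (Python) =====
-- MODEL_COMPAT_GROUPS = [
--     {"ernie"},
--     {"sdxl"},                                      # SDXL-arch — all merged into one now
--     {"flux1"},                                     # Flux1 variants — all merged into one now
--     {"zimage"},                                    # Z-Image — all merged
--     {"flux2"},                                     # Flux2 — all merged
--     {"wan_image", "wan_video_t2v"},                # WAN Image shares T2V model files
-- ]
--
-- def get_compatible_families(family):
--     """Return the set of all checkpoint-families compatible with the given one."""
--     if not family:
--         return set()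
--     result = {family}
--     for group in MODEL_COMPAT_GROUPS:
--         if family in group:
--             result |= group
--     return result
-- ===== SOURCE B (Python) =====
-- MODEL_COMPAT_GROUPS = [
--     {"ernie"},
--     {"sdxl"},
--     {"flux1"},
--     {"zimage"},
--     {"flux2"},
--     {"wan_image", "wan_video_t2v"},
-- ]
--
-- # Inverted index built once: each family name -> its full compatibility group.
-- FAMILY_TO_GROUP = {}
-- for _g in MODEL_COMPAT_GROUPS:
--     for _f in _g:
--         FAMILY_TO_GROUP[_f] = _g
--
-- def get_compatible_families(family):
--     """Return the set of all checkpoint-families compatible with the given one."""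
--     if not family:
--         return set()
--     return {family} | FAMILY_TO_GROUP.get(family, set())
-- ===== Notes on version B (the rewrite author's own statement) =====
-- stated objective: simpler
-- what changed: Replaces the per-call scan over all compatibility groups with an inverted index built once at module load (family -> its group), so the function body is a single dict lookup unioned with {family}.
import Mathlib
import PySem

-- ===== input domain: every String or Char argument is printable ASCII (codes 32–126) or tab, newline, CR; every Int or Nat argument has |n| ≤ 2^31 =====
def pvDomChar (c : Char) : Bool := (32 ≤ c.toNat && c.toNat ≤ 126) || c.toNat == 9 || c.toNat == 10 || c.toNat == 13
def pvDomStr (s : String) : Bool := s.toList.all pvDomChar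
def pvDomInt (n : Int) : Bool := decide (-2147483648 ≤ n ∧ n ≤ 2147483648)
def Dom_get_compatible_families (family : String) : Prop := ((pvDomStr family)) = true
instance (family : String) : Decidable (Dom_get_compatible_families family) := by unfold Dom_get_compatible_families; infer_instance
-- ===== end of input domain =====

-- B builds an inverted index (family -> its group) once and replaces A's scan over
-- all groups with a single dict lookup; objective: simpler per-call body.
-- ===== PORT A =====
-- MODEL_COMPAT_GROUPS: the module constant, each group a Python set (distinct elements)
def pvGroups : List (PySem.Set String) :=
  [["ernie"], ["sdxl"], ["flux1"], ["zimage"], ["flux2"], ["wan_image", "wan_video_t2v"]]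

def get_compatible_families (family : String) : List String :=
  if family = "" then PySem.Set.empty
  else
    pvGroups.foldl
      (fun result group =>
        if PySem.Set.contains group family then PySem.Set.union result group else result)
      (PySem.Set.ofList [family])

-- ===== PORT B =====
-- FAMILY_TO_GROUP: built once by the module-level loops of Source B (dict only looked up afterwards)
def pvFamilyToGroup : PySem.Dict String (PySem.Set String) :=
  pvGroups.foldl (fun d g => g.foldl (fun d' f => d'.insert f g) d) PySem.Dict.empty

def get_compatible_families_alt (family : String) : List String :=
  if family = "" then PySem.Set.empty
  else PySem.Set.union (PySem.Set.ofList [family]) (pvFamilyToGroup.getD family PySem.Set.empty)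

-- ===== PRECONDITION & SPEC =====
def Spec_get_compatible_families (family : String) (out : List String) : Prop := out = get_compatible_families_alt family
instance (family : String) (out : List String) : Decidable (Spec_get_compatible_families family out) := by unfold Spec_get_compatible_families; infer_instance

-- ===== CLAIM (what is proved, stated in full; the proofs are below) =====
def Claim_equal_get_compatible_families : Prop := ∀ (family : String), Dom_get_compatible_families family → Spec_get_compatible_families family (get_compatible_families family)

-- ===== LEMMAS AND PROOFS =====

-- ===== VERDICT (by name: the statement is the Claim_ definition above) =====
theorem get_compatible_families_spec : Claim_equal_get_compatible_families := by
  intro family _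
  unfold Spec_get_compatible_families get_compatible_families get_compatible_families_alt
  by_cases h0 : family = ""
  · simp [h0]
  · by_cases h1 : family = "ernie"; · subst h1; decide
    by_cases h2 : family = "sdxl"; · subst h2; decide
    by_cases h3 : family = "flux1"; · subst h3; decide
    by_cases h4 : family = "zimage"; · subst h4; decide
    by_cases h5 : family = "flux2"; · subst h5; decide
    by_cases h6 : family = "wan_image"; · subst h6; decide
    by_cases h7 : family = "wan_video_t2v"; · subst h7; decide
    have e1 : ("ernie" == family) = false := by simp [Ne.symm h1]
    have e2 : ("sdxl" == family) = false := by simp [Ne.symm h2]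
    have e3 : ("flux1" == family) = false := by simp [Ne.symm h3]
    have e4 : ("zimage" == family) = false := by simp [Ne.symm h4]
    have e5 : ("flux2" == family) = false := by simp [Ne.symm h5]
    have e6 : ("wan_image" == family) = false := by simp [Ne.symm h6]
    have e7 : ("wan_video_t2v" == family) = false := by simp [Ne.symm h7]
    simp [pvGroups, pvFamilyToGroup, PySem.Set.contains, PySem.Set.union,
      PySem.Set.update, PySem.Set.ofList, PySem.Set.add, PySem.Dict.getD,
      PySem.Dict.get?, PySem.Dict.insert, PySem.Dict.empty, List.foldl, List.find?,
      h1, h2, h3, h4, h5, h6, h7, e1, e2, e3, e4, e5, e6, e7]
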